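-- pv_equiv track=rewrite | github.com/VaHiX/CodeForces | Python/ByRound/2047/2047_D_Move_Back_at_a_Cost.py | fn
-- ===== SOURCE A (Python) =====
-- def fn(n, a):
--     stk = []  # Stack to simulate operations
--     no = []   # List to store elements that will be incremented and moved
--     for i in a:
--         # While current element is smaller than stack top, move the top (increment it)
--         while stk and i < stk[-1]:
--             no.append(stk.pop() + 1)  # Increment and add to no list
--         stk.append(i)  # Add current element to stack
--
--     if not no:  # If no elements were moved, return original stack
--         return stk
--
--     no.sort()  # Sort to make the result lexicographically minimal
--     ans = []
--     for i in stk: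
--         if i <= no[0]:
--             ans.append(i)
--         else:
--             no.append(i + 1)  # If value is greater than smallest in no, increment and add
--     return ans + sorted(no)
-- ===== SOURCE B (Python) =====
-- def fn(n, a):
--     # One right-to-left pass over a suffix minimum instead of a monotonic stack:
--     # a[j] survives iff it is <= every strictly later element.
--     kept_rev = []
--     no = []
--     m = None  # minimum of the elements strictly to the right
--     for x in reversed(a):
--         if m is None or x <= m:
--             kept_rev.append(x)
--             m = x
--         else:
--             no.append(x + 1)
--     kept = kept_rev[::-1]
--     if not no:
--         return kept
--     m0 = min(no)
--     return [x for x in kept if x <= m0] + sorted(no + [x + 1 for x in kept if x > m0])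
-- ===== Notes on version B (the rewrite author's own statement) =====
-- stated objective: alternative
-- what changed: Replaces the monotonic-stack pop loop by a single right-to-left suffix-minimum pass (an element survives iff it is <= every strictly later element), and replaces the second stateful loop over survivors by min(no) plus two comprehensions.
import Mathlib
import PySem

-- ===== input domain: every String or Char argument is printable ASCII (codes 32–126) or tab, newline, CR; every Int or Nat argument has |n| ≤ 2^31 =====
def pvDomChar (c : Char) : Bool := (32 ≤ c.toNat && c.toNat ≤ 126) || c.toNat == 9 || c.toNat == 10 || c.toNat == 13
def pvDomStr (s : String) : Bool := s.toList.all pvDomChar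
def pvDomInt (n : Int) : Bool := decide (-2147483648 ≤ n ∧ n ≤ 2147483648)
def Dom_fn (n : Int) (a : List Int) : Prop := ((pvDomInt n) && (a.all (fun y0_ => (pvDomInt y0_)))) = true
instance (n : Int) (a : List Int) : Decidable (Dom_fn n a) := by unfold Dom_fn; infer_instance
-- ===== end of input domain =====

-- B replaces A's monotonic-stack pop loop by one right-to-left suffix-minimum pass and A's
-- second stateful loop by min(no) plus two filters; alternative decomposition, same cost.

-- ===== PORT A =====
-- the Python stack is held top-first: stk.append(i) = cons, stk[-1] = head, stk.pop() = tail;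
-- it is reversed back to bottom-first (Python list order) after the loop.
def popA (i : Int) : List Int → List Int → List Int × List Int
  | [], no => ([], no)
  | t :: rest, no => if i < t then popA i rest (no ++ [t + 1]) else (t :: rest, no)

def stepA1 (s : List Int × List Int) (i : Int) : List Int × List Int :=
  let p := popA i s.1 s.2
  (i :: p.1, p.2)

def stepA2 (s : List Int × List Int) (i : Int) : List Int × List Int :=
  if i ≤ s.2.headD 0 then (s.1 ++ [i], s.2) else (s.1, s.2 ++ [i + 1])

def fn (n : Int) (a : List Int) : List Int :=
  let st := a.foldl stepA1 ([], [])
  let stk := st.1.reverse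
  let no := st.2
  if no = [] then stk
  else
    let no1 := PySem.List.sorted no (fun x => x) false
    -- no[0] is read each iteration; appends go to the end, so headD sees the same element
    let fin := stk.foldl stepA2 ([], no1)
    fin.1 ++ PySem.List.sorted fin.2 (fun x => x) false

-- ===== PORT B =====
-- state: (m = suffix minimum so far, kept_rev, no); the loop runs over reversed(a)
def stepB (s : Option Int × List Int × List Int) (x : Int) : Option Int × List Int × List Int :=
  match s.1 with
  | none => (some x, s.2.1 ++ [x], s.2.2)
  | some m => if x ≤ m then (some x, s.2.1 ++ [x], s.2.2)
              else (s.1, s.2.1, s.2.2 ++ [x + 1])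

def fn_alt (n : Int) (a : List Int) : List Int :=
  let st := a.reverse.foldl stepB (none, [], [])
  let kept := st.2.1.reverse
  let no := st.2.2
  if no = [] then kept
  else
    -- min(no): no is nonempty in this branch, so min? is some and getD's default is unreachable
    let m0 := (PySem.List.min? no (fun x => x)).getD 0
    kept.filter (fun x => decide (x ≤ m0)) ++
      PySem.List.sorted (no ++ (kept.filter (fun x => decide (m0 < x))).map (· + 1)) (fun x => x) false

-- ===== PRECONDITION & SPEC =====
def Spec_fn (n : Int) (a : List Int) (out : List Int) : Prop := out = fn_alt n a
instance (n : Int) (a : List Int) (out : List Int) : Decidable (Spec_fn n a out) := by unfold Spec_fn; infer_instance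

-- ===== CLAIM (what is proved, stated in full; the proofs are below) =====
def Claim_equal_fn : Prop := ∀ (n : Int) (a : List Int), Dom_fn n a → Spec_fn n a (fn n a)

-- ===== LEMMAS AND PROOFS =====

-- reference right-fold: (kept, moved, suffix minimum) of a list
def km : List Int → List Int × List Int × Option Int
  | [] => ([], [], none)
  | x :: rest =>
    let r := km rest
    match r.2.2 with
    | none => (x :: r.1, r.2.1, some x)
    | some mn => if x ≤ mn then (x :: r.1, r.2.1, some x)
                 else (r.1, (x + 1) :: r.2.1, some mn)

def keepP (m : Option Int) (s : Int) : Bool :=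
  match m with
  | none => true
  | some mn => decide (s ≤ mn)

theorem filter_not_le (c : Int) (l : List Int) :
    l.filter (fun x => !decide (x ≤ c)) = l.filter (fun x => decide (c < x)) := by
  apply List.filter_congr
  intro x _
  by_cases h : x ≤ c <;> simp [h] <;> omega

theorem filter_keepP_none (l : List Int) : l.filter (keepP none) = l :=
  List.filter_eq_self.mpr (fun s _ => by simp [keepP])

theorem filter_keepP_some (c : Int) (l : List Int) :
    l.filter (keepP (some c)) = l.filter (fun s => decide (s ≤ c)) :=
  List.filter_congr (fun s _ => by simp [keepP])

theorem popA_spec (i : Int) : ∀ (stk no : List Int), stk.Pairwise (fun x y => y ≤ x) →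
    popA i stk no = (stk.filter (fun s => decide (s ≤ i)),
                     no ++ (stk.filter (fun s => decide (i < s))).map (· + 1))
  | [], no, _ => by simp [popA]
  | t :: rest, no, hp => by
    rw [List.pairwise_cons] at hp
    by_cases hit : i < t
    · have hteq : ¬ t ≤ i := by omega
      rw [popA, if_pos hit, popA_spec i rest (no ++ [t + 1]) hp.2]
      simp [hteq, hit, List.append_assoc]
    · have hti : t ≤ i := by omega
      have h1 : rest.filter (fun s => decide (s ≤ i)) = rest :=
        List.filter_eq_self.mpr (fun s hs => by
          simp only [decide_eq_true_eq]
          exact le_trans (hp.1 s hs) hti)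
      have h2 : (t :: rest).filter (fun s => decide (i < s)) = [] :=
        List.filter_eq_nil_iff.mpr (fun s hs => by
          simp only [decide_eq_true_eq, not_lt]
          rcases List.mem_cons.mp hs with h | h
          · omega
          · exact le_trans (hp.1 s h) hti)
      rw [popA, if_neg hit, h2]
      simp [hti, h1]

theorem stack_sorted_step (i : Int) (stk : List Int) (hp : stk.Pairwise (fun x y => y ≤ x)) :
    (i :: stk.filter (fun s => decide (s ≤ i))).Pairwise (fun x y => y ≤ x) := by
  rw [List.pairwise_cons]
  constructor
  · intro s hs
    simp only [List.mem_filter, decide_eq_true_eq] at hs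
    exact hs.2
  · exact hp.filter _

theorem A_loop : ∀ (a stk no : List Int), stk.Pairwise (fun x y => y ≤ x) →
    (a.foldl stepA1 (stk, no)).1 = (km a).1.reverse ++ stk.filter (keepP (km a).2.2)
    ∧ ((a.foldl stepA1 (stk, no)).2 : Multiset Int)
        = ↑no + ↑((stk.filter (fun s => !keepP (km a).2.2 s)).map (· + 1)) + ↑(km a).2.1
  | [], stk, no, hp => by
    have hnil : stk.filter (fun s => !keepP none s) = [] :=
      List.filter_eq_nil_iff.mpr (fun s _ => by simp [keepP])
    refine ⟨?_, ?_⟩ <;> simp [km, filter_keepP_none, hnil]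
  | i :: rest, stk, no, hp => by
    have hstep : (i :: rest).foldl stepA1 (stk, no)
        = rest.foldl stepA1 (i :: stk.filter (fun s => decide (s ≤ i)),
            no ++ (stk.filter (fun s => decide (i < s))).map (· + 1)) := by
      simp only [List.foldl_cons, stepA1, popA_spec i stk no hp]
    obtain ⟨IH1, IH2⟩ := A_loop rest _ _ (stack_sorted_step i stk hp)
    rw [hstep]
    rcases hkm : km rest with ⟨k, mv, m⟩
    rw [hkm] at IH1 IH2
    dsimp only at IH1 IH2
    cases m with
    | none =>
      have hkm' : km (i :: rest) = (i :: k, mv, some i) := by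
        simp [km, hkm]
      have h0 : ((i :: stk.filter (fun s => decide (s ≤ i))).filter
          (fun s => !keepP none s)) = [] :=
        List.filter_eq_nil_iff.mpr (fun s _ => by simp [keepP])
      rw [hkm']
      dsimp only
      refine ⟨?_, ?_⟩
      · rw [IH1, filter_keepP_none, filter_keepP_some]
        simp
      · rw [IH2, h0]
        simp [keepP, filter_not_le, Multiset.coe_add]
    | some mn =>
      by_cases hle : i ≤ mn
      · have hkm' : km (i :: rest) = (i :: k, mv, some i) := by
          simp [km, hkm, hle]
        have hall : (i :: stk.filter (fun s => decide (s ≤ i))).filter (keepP (some mn))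
            = i :: stk.filter (fun s => decide (s ≤ i)) := by
          rw [filter_keepP_some]
          refine List.filter_eq_self.mpr (fun s hs => ?_)
          simp only [decide_eq_true_eq]
          rcases List.mem_cons.mp hs with h | h
          · omega
          · have := (List.mem_filter.mp h).2
            simp only [decide_eq_true_eq] at this
            omega
        have h0 : ((i :: stk.filter (fun s => decide (s ≤ i))).filter
            (fun s => !keepP (some mn) s)) = [] :=
          List.filter_eq_nil_iff.mpr (fun s hs => by
            rcases List.mem_cons.mp hs with h | h
            · subst h
              simp [keepP]
              omega
            · have := (List.mem_filter.mp h).2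
              simp only [decide_eq_true_eq] at this
              simp [keepP]
              omega)
        rw [hkm']
        dsimp only
        refine ⟨?_, ?_⟩
        · rw [IH1, hall, filter_keepP_some]
          simp
        · rw [IH2, h0]
          simp [keepP, filter_not_le, Multiset.coe_add]
      · have hkm' : km (i :: rest) = (k, (i + 1) :: mv, some mn) := by
          simp [km, hkm, hle]
        have hif : decide (i ≤ mn) = false := by
          simp only [decide_eq_false_iff_not]
          omega
        have hstep1 : (i :: stk.filter (fun s => decide (s ≤ i))).filter (keepP (some mn))
            = stk.filter (keepP (some mn)) := by
          rw [filter_keepP_some, filter_keepP_some, List.filter_cons, hif]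
          simp only [Bool.false_eq_true, if_false]
          rw [List.filter_filter]
          refine List.filter_congr (fun s _ => ?_)
          by_cases h : s ≤ mn
          · have : s ≤ i := by omega
            simp [h, this]
          · simp [h]
        rw [hkm']
        dsimp only
        refine ⟨?_, ?_⟩
        · rw [IH1, hstep1]
        · rw [IH2]
          have hp1 : (stk.filter (fun s => !decide (s ≤ mn))).filter
              (fun s => decide (i < s)) = stk.filter (fun s => decide (i < s)) := by
            rw [List.filter_filter]
            refine List.filter_congr (fun s _ => ?_)
            by_cases h : i < s
            · have : ¬ s ≤ mn := by omega
              simp [h, this]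
            · simp [h]
          have hp2 : (stk.filter (fun s => !decide (s ≤ mn))).filter
              (fun s => !decide (i < s))
              = stk.filter (fun s => !decide (s ≤ mn) && decide (s ≤ i)) := by
            rw [List.filter_filter]
            refine List.filter_congr (fun s _ => ?_)
            by_cases h : s ≤ mn
            · simp [h]
            · by_cases h3 : i < s <;> simp [h, h3] <;> omega
          have hsplit : (stk.filter (fun s => !decide (s ≤ mn))).Perm
              (stk.filter (fun s => decide (i < s)) ++
               stk.filter (fun s => !decide (s ≤ mn) && decide (s ≤ i))) := by
            have hpa := List.filter_append_perm (fun s => decide (i < s))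
              (stk.filter (fun s => !decide (s ≤ mn)))
            simp only [hp1, hp2] at hpa
            exact hpa.symm
          have hmall : (↑((stk.filter (fun s => !decide (s ≤ mn))).map (· + 1)) : Multiset Int)
              = ↑((stk.filter (fun s => decide (i < s))).map (· + 1))
                + ↑((stk.filter (fun s => !decide (s ≤ mn) && decide (s ≤ i))).map (· + 1)) := by
            rw [Multiset.coe_add]
            exact Multiset.coe_eq_coe.mpr (by simpa using hsplit.map (· + 1))
          simp only [keepP]
          have hcons : ((i :: stk.filter (fun s => decide (s ≤ i))).filter
              (fun s => !decide (s ≤ mn)))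
              = i :: (stk.filter (fun s => decide (s ≤ i))).filter (fun s => !decide (s ≤ mn)) := by
            simp [List.filter_cons, hif]
          rw [hcons, List.filter_filter, hmall]
          simp only [← Multiset.coe_add, List.map_cons, ← Multiset.cons_coe,
            ← Multiset.singleton_add]
          abel
termination_by a => a.length

-- B's reversed-foldl computes km
theorem B_loop : ∀ (a : List Int),
    a.reverse.foldl stepB (none, [], [])
      = ((km a).2.2, (km a).1.reverse, (km a).2.1.reverse)
  | [] => by simp [km]
  | x :: rest => by
    rw [List.reverse_cons, List.foldl_append, B_loop rest]
    simp only [List.foldl_cons, List.foldl_nil, stepB, km]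
    cases hm : (km rest).2.2 with
    | none => simp
    | some mn =>
      by_cases hxm : x ≤ mn <;> simp [hxm]

theorem second_fold : ∀ (l ans : List Int) (h : Int) (t ex : List Int),
    l.foldl stepA2 (ans, (h :: t) ++ ex) =
      (ans ++ l.filter (fun x => decide (x ≤ h)),
       (h :: t) ++ (ex ++ (l.filter (fun x => !decide (x ≤ h))).map (· + 1)))
  | [], ans, h, t, ex => by simp
  | x :: l, ans, h, t, ex => by
    by_cases hx : x ≤ h
    · have hh : stepA2 (ans, (h :: t) ++ ex) x = (ans ++ [x], (h :: t) ++ ex) := by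
        simp [stepA2, hx]
      rw [List.foldl_cons, hh, second_fold l (ans ++ [x]) h t ex]
      simp [hx]
    · have hh : stepA2 (ans, (h :: t) ++ ex) x = (ans, (h :: t) ++ (ex ++ [x + 1])) := by
        simp [stepA2, hx]
      rw [List.foldl_cons, hh, second_fold l ans h t (ex ++ [x + 1])]
      simp [hx]

theorem fn_eq (n : Int) (a : List Int) : fn n a = fn_alt n a := by
  obtain ⟨H1, H2⟩ := A_loop a [] [] List.Pairwise.nil
  have HB := B_loop a
  rcases hkm : km a with ⟨k, mv, m⟩
  rw [hkm] at H1 H2 HB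
  dsimp only at H1 H2 HB
  have H1' : (List.foldl stepA1 ([], []) a).1 = k.reverse := by
    rw [H1]
    simp
  have hP : (List.foldl stepA1 ([], []) a).2.Perm mv := by
    refine Multiset.coe_eq_coe.mp ?_
    rw [H2]
    simp
  simp only [fn, fn_alt, HB, H1', List.reverse_reverse]
  by_cases hmv : mv = []
  · subst hmv
    have hnoA : (List.foldl stepA1 ([], []) a).2 = [] := hP.eq_nil
    simp [hnoA]
  · have hnoA : (List.foldl stepA1 ([], []) a).2 ≠ [] := fun h => by
      rw [h] at hP
      exact hmv hP.symm.eq_nil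
    have hmvr : mv.reverse ≠ [] := by simpa using hmv
    rw [if_neg hnoA, if_neg hmvr]
    cases hsort : PySem.List.sorted (List.foldl stepA1 ([], []) a).2 (fun x => x) false with
    | nil => exact absurd ((PySem.List.sorted_eq_nil_iff _ _ _).mp hsort) hnoA
    | cons h t =>
      have hperm_ht : (h :: t).Perm (List.foldl stepA1 ([], []) a).2 := by
        rw [← hsort]
        exact PySem.List.sorted_perm _ _ _
      have hmem_h : h ∈ (List.foldl stepA1 ([], []) a).2 :=
        hperm_ht.subset (List.mem_cons_self)
      have hhmin : ∀ y ∈ (List.foldl stepA1 ([], []) a).2, h ≤ y := by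
        simpa using PySem.List.key_head_sorted_le _ _ hsort
      obtain ⟨m', hm'⟩ : ∃ m', PySem.List.min? mv.reverse (fun x => x) = some m' := by
        cases hx : PySem.List.min? mv.reverse (fun x => x) with
        | none => exact absurd ((PySem.List.min?_eq_none_iff _ _).mp hx) hmvr
        | some v => exact ⟨v, rfl⟩
      have hm'mem : m' ∈ (List.foldl stepA1 ([], []) a).2 :=
        hP.symm.subset (List.mem_reverse.mp (PySem.List.min?_mem hm'))
      have hm'min : ∀ y ∈ mv.reverse, m' ≤ y := by
        intro y hy
        simpa using PySem.List.min?_isMin hm' y hy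
      have hm0 : m' = h :=
        le_antisymm (hm'min h (List.mem_reverse.mpr (hP.subset hmem_h))) (hhmin m' hm'mem)
      have hsf := second_fold k [] h t []
      simp only [List.append_nil] at hsf
      rw [hsf, hm']
      dsimp only [Option.getD]
      rw [hm0, filter_not_le]
      simp only [List.nil_append]
      congr 1
      refine (PySem.List.sorted_id_eq_sorted_id_iff_perm _ _).mpr ?_
      exact (hperm_ht.trans (hP.trans (List.reverse_perm mv).symm)).append (List.Perm.refl _)

-- ===== VERDICT (by name: the statement is the Claim_ definition above) =====
theorem fn_spec : Claim_equal_fn := by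
  intro n a _
  unfold Spec_fn
  exact fn_eq n a
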